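-- pv_equiv track=rewrite | github.com/Tropi328/TradingBot | tools/score_audit.py | categorize_blockers
-- ===== SOURCE A (Python) =====
-- from collections import Counter, defaultdict
--
-- _CATEGORY_MAP = {
--     "score_observe": [
--         "SCORE_BELOW_MIN", "SCALP_SCORE_TOO_LOW",
--     ],
--     "structural": [
--         "SCALP_NO_MSS", "SCALP_NO_DISPLACEMENT", "SCALP_NO_FVG",
--         "SCALP_BIAS_MISMATCH", "H1_NO_BOS", "H1_BIAS_NEUTRAL", "H1_PD_FAIL",
--         "NEWS_BLOCKED", "SCALP_CANDIDATE_EXPIRED", "SCALP_ATR_WARMUP",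
--     ],
--     "reaction_wait": [
--         "GATE_REACTION_WAIT_REACTION", "GATE_REACTION_WAIT_MITIGATION",
--         "REACTION_TIMEOUT_SOFT_REACTION", "REACTION_TIMEOUT_SOFT_MITIGATION",
--         "SOFT_REASON_REACTION_WAIT_SOFT_MITIGATION", "SOFT_REASON_REACTION_WAIT_SOFT_REACTION",
--         "SOFT_REASON_WAIT_TIMEOUT_SOFT_MODE",
--     ],
--     "execution": [
--         "EXEC_FAIL_MISSING_FEATURES", "EXEC_FAIL_SPREAD_TOO_HIGH",
--         "EXEC_FAIL_CONFIRMATIONS_LOW", "EXEC_FAIL_MARKET_CLOSED",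
--         "EXEC_FAIL_INVALID_ATR", "EXEC_FAIL_NO_PRICE",
--     ],
--     "risk_budget": [
--         "KILL_SWITCH_DAILY_LOSS", "DAILY_PROFIT_LOCKED",
--         "PER_TRADE_RISK_TOO_HIGH", "OPEN_RISK_CAP_EXCEEDED",
--         "RISK_MAX_TRADES_DAY", "RISK_DAILY_STOP",
--     ],
--     "margin_size": [
--         "SIZE_TOO_SMALL", "SIZE_MARGIN_LIMIT", "SIZE_INVALID",
--         "INSUFFICIENT_EQUITY", "INSUFFICIENT_MARGIN",
--         "EDGE_TOO_SMALL",
--     ],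
--     "spread_cost": [
--         "SPREAD_EXCEEDS_MAX", "SPREAD_EXCEEDS_PERCENTILE",
--         "SOFT_REASON_ASSUMED_OHLC_SPREAD",
--     ],
--     "correlation": [
--         "CORRELATION_EXPOSURE", "SOFT_REASON_CORRELATION_EXPOSURE",
--     ],
-- }
--
-- def categorize_blockers(blockers: dict[str, int]) -> dict[str, dict[str, int]]:
--     categorized: dict[str, dict[str, int]] = defaultdict(dict)
--     for reason, count in blockers.items():
--         placed = False
--         for cat, patterns in _CATEGORY_MAP.items():
--             if reason in patterns or any(reason.startswith(p) for p in patterns):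
--                 categorized[cat][reason] = count
--                 placed = True
--                 break
--         if not placed:
--             categorized["other"][reason] = count
--     return dict(categorized)
-- ===== SOURCE B (Python) =====
-- _CATEGORY_MAP = {
--     "score_observe": [
--         "SCORE_BELOW_MIN", "SCALP_SCORE_TOO_LOW",
--     ],
--     "structural": [
--         "SCALP_NO_MSS", "SCALP_NO_DISPLACEMENT", "SCALP_NO_FVG",
--         "SCALP_BIAS_MISMATCH", "H1_NO_BOS", "H1_BIAS_NEUTRAL", "H1_PD_FAIL",
--         "NEWS_BLOCKED", "SCALP_CANDIDATE_EXPIRED", "SCALP_ATR_WARMUP",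
--     ],
--     "reaction_wait": [
--         "GATE_REACTION_WAIT_REACTION", "GATE_REACTION_WAIT_MITIGATION",
--         "REACTION_TIMEOUT_SOFT_REACTION", "REACTION_TIMEOUT_SOFT_MITIGATION",
--         "SOFT_REASON_REACTION_WAIT_SOFT_MITIGATION", "SOFT_REASON_REACTION_WAIT_SOFT_REACTION",
--         "SOFT_REASON_WAIT_TIMEOUT_SOFT_MODE",
--     ],
--     "execution": [
--         "EXEC_FAIL_MISSING_FEATURES", "EXEC_FAIL_SPREAD_TOO_HIGH",
--         "EXEC_FAIL_CONFIRMATIONS_LOW", "EXEC_FAIL_MARKET_CLOSED",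
--         "EXEC_FAIL_INVALID_ATR", "EXEC_FAIL_NO_PRICE",
--     ],
--     "risk_budget": [
--         "KILL_SWITCH_DAILY_LOSS", "DAILY_PROFIT_LOCKED",
--         "PER_TRADE_RISK_TOO_HIGH", "OPEN_RISK_CAP_EXCEEDED",
--         "RISK_MAX_TRADES_DAY", "RISK_DAILY_STOP",
--     ],
--     "margin_size": [
--         "SIZE_TOO_SMALL", "SIZE_MARGIN_LIMIT", "SIZE_INVALID",
--         "INSUFFICIENT_EQUITY", "INSUFFICIENT_MARGIN",
--         "EDGE_TOO_SMALL",
--     ],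
--     "spread_cost": [
--         "SPREAD_EXCEEDS_MAX", "SPREAD_EXCEEDS_PERCENTILE",
--         "SOFT_REASON_ASSUMED_OHLC_SPREAD",
--     ],
--     "correlation": [
--         "CORRELATION_EXPOSURE", "SOFT_REASON_CORRELATION_EXPOSURE",
--     ],
-- }
--
-- # Hash index: one dict pattern -> category built once.  The 42 patterns are
-- # distinct and PREFIX-FREE (no pattern is a prefix of another), so each reason
-- # has AT MOST ONE matching pattern; scanning the patterns is therefore
-- # unnecessary: probe the dict with each prefix reason[:i] of the reason instead.
-- _PATTERN_CAT = {p: cat for cat, pats in _CATEGORY_MAP.items() for p in pats}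
--
--
-- def _classify(reason: str) -> str:
--     for i in range(1, len(reason) + 1):
--         cat = _PATTERN_CAT.get(reason[:i])
--         if cat is not None:
--             return cat
--     return "other"
--
--
-- def categorize_blockers(blockers: dict[str, int]) -> dict[str, dict[str, int]]:
--     categorized: dict[str, dict[str, int]] = {}
--     for reason, count in blockers.items():
--         categorized.setdefault(_classify(reason), {})[reason] = count
--     return categorized
-- ===== Notes on version B (the rewrite author's own statement) =====
-- stated objective: faster
-- what changed: B builds a hash index pattern->category once and classifies each reason by probing that dict with the reason's successive prefixes reason[:i] (correct because the 42 patterns are distinct and prefix-free, so at most one pattern can match), replacing A's per-reason scan over all categories and patterns with membership + startswith tests, the placed flag and the defaultdict.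
import Mathlib
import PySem

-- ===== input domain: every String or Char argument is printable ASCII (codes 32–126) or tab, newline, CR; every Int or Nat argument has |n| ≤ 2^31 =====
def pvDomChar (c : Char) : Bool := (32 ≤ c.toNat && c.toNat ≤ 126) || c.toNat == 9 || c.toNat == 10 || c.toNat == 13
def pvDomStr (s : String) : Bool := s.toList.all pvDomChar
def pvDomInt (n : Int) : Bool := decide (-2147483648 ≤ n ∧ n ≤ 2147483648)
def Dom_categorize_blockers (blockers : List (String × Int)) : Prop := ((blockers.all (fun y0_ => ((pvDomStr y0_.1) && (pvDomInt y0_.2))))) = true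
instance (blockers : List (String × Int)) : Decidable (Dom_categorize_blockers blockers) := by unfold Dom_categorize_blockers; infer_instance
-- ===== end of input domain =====

-- B replaces A's per-reason scan over all categories/patterns (membership + startswith +
-- 'placed' flag + defaultdict) by one pattern→category hash index probed with the reason's
-- successive prefixes; correct because the patterns are distinct and prefix-free (objective: faster).

-- the module constant _CATEGORY_MAP (shared by both programs)
def categoryMap : List (String × List String) := [
  ("score_observe", ["SCORE_BELOW_MIN", "SCALP_SCORE_TOO_LOW"]),
  ("structural", ["SCALP_NO_MSS", "SCALP_NO_DISPLACEMENT", "SCALP_NO_FVG", "SCALP_BIAS_MISMATCH", "H1_NO_BOS", "H1_BIAS_NEUTRAL", "H1_PD_FAIL", "NEWS_BLOCKED", "SCALP_CANDIDATE_EXPIRED", "SCALP_ATR_WARMUP"]),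
  ("reaction_wait", ["GATE_REACTION_WAIT_REACTION", "GATE_REACTION_WAIT_MITIGATION", "REACTION_TIMEOUT_SOFT_REACTION", "REACTION_TIMEOUT_SOFT_MITIGATION", "SOFT_REASON_REACTION_WAIT_SOFT_MITIGATION", "SOFT_REASON_REACTION_WAIT_SOFT_REACTION", "SOFT_REASON_WAIT_TIMEOUT_SOFT_MODE"]),
  ("execution", ["EXEC_FAIL_MISSING_FEATURES", "EXEC_FAIL_SPREAD_TOO_HIGH", "EXEC_FAIL_CONFIRMATIONS_LOW", "EXEC_FAIL_MARKET_CLOSED", "EXEC_FAIL_INVALID_ATR", "EXEC_FAIL_NO_PRICE"]),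
  ("risk_budget", ["KILL_SWITCH_DAILY_LOSS", "DAILY_PROFIT_LOCKED", "PER_TRADE_RISK_TOO_HIGH", "OPEN_RISK_CAP_EXCEEDED", "RISK_MAX_TRADES_DAY", "RISK_DAILY_STOP"]),
  ("margin_size", ["SIZE_TOO_SMALL", "SIZE_MARGIN_LIMIT", "SIZE_INVALID", "INSUFFICIENT_EQUITY", "INSUFFICIENT_MARGIN", "EDGE_TOO_SMALL"]),
  ("spread_cost", ["SPREAD_EXCEEDS_MAX", "SPREAD_EXCEEDS_PERCENTILE", "SOFT_REASON_ASSUMED_OHLC_SPREAD"]),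
  ("correlation", ["CORRELATION_EXPOSURE", "SOFT_REASON_CORRELATION_EXPOSURE"])]

-- ===== PORT A =====
-- A's inner 'for cat, patterns in _CATEGORY_MAP.items(): … break' with the 'placed' flag:
-- first category whose patterns match (exact membership or prefix), none = not placed
def placeA (reason : String) : List (String × List String) → Option String
  | [] => none
  | (cat, patterns) :: rest =>
    if patterns.contains reason || patterns.any (fun p => PySem.Str.startswith reason p) then some cat
    else placeA reason rest

def categorize_blockers (blockers : List (String × Int)) : List (String × List (String × Int)) :=
  let categorized : PySem.Dict String (PySem.Dict String Int) :=
    blockers.foldl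
      (fun d rc =>
        match placeA rc.1 categoryMap with
        | some cat => d.modify cat PySem.Dict.empty (fun inner => inner.insert rc.1 rc.2)   -- categorized[cat][reason] = count (defaultdict)
        | none => d.modify "other" PySem.Dict.empty (fun inner => inner.insert rc.1 rc.2))  -- categorized["other"][reason] = count
      PySem.Dict.empty
  categorized.items.map (fun ci => (ci.1, ci.2.items))

-- ===== PORT B =====
-- _PATTERN_CAT = {p: cat for cat, pats in _CATEGORY_MAP.items() for p in pats}
def patternCat : PySem.Dict String String :=
  PySem.Dict.ofList (categoryMap.flatMap (fun cp => cp.2.map (fun p => (p, cp.1))))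

-- the 'for i in range(1, len(reason)+1): … return' loop of _classify
def classifyLoop (tbl : PySem.Dict String String) (reason : String) : List Int → String
  | [] => "other"                                                   -- return "other"
  | i :: rest =>
    match tbl.get? (PySem.Str.slice reason none (some i)) with      -- _PATTERN_CAT.get(reason[:i])
    | some cat => cat                                               -- if cat is not None: return cat
    | none => classifyLoop tbl reason rest

def classifyB (reason : String) : String :=
  classifyLoop patternCat reason (PySem.List.pyRange 1 (PySem.Str.len reason + 1) 1)

def categorize_blockers_alt (blockers : List (String × Int)) : List (String × List (String × Int)) :=
  let categorized : PySem.Dict String (PySem.Dict String Int) :=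
    blockers.foldl
      (fun d rc =>
        -- categorized.setdefault(_classify(reason), {})[reason] = count
        d.insert (classifyB rc.1) ((d.getD (classifyB rc.1) PySem.Dict.empty).insert rc.1 rc.2))
      PySem.Dict.empty
  categorized.items.map (fun ci => (ci.1, ci.2.items))

-- ===== PRECONDITION & SPEC =====
def Spec_categorize_blockers (blockers : List (String × Int)) (out : List (String × List (String × Int))) : Prop := out = categorize_blockers_alt blockers
instance (blockers : List (String × Int)) (out : List (String × List (String × Int))) : Decidable (Spec_categorize_blockers blockers out) := by unfold Spec_categorize_blockers; infer_instance

-- ===== CLAIM (what is proved, stated in full; the proofs are below) =====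
def Claim_equal_categorize_blockers : Prop := ∀ (blockers : List (String × Int)), Dom_categorize_blockers blockers → Spec_categorize_blockers blockers (categorize_blockers blockers)

-- ===== LEMMAS AND PROOFS =====

-- the flattened (pattern, category) table underlying both the dict comprehension and A's scan
def flatPats : List (String × String) :=
  categoryMap.flatMap (fun cp => cp.2.map (fun p => (p, cp.1)))

set_option maxRecDepth 100000 in
lemma items_patternCat : patternCat.items = flatPats := by decide

set_option maxRecDepth 100000 in
lemma keys_patternCat_nodup : patternCat.keys.Nodup := by decide

-- the 42 patterns are pairwise prefix-free (and in particular nonempty)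
set_option maxRecDepth 100000 in
lemma pats_prefixfree :
    (flatPats.all (fun a => flatPats.all
      (fun b => a.1 == b.1 || !(a.1.toList.isPrefixOf b.1.toList)))) = true := by decide

set_option maxRecDepth 100000 in
lemma pats_nonempty : (flatPats.all (fun a => !(a.1 == ""))) = true := by decide

-- every string is a prefix of itself
lemma startswith_self (s : String) : PySem.Str.startswith s s = true := by
  simp [PySem.Str.startswith_eq, PySem.Chars.startswith_iff]

lemma cond_eq (r : String) (ps : List String) :
    (ps.contains r || ps.any (fun p => PySem.Str.startswith r p)) =
      ps.any (fun p => PySem.Str.startswith r p) := by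
  cases h : ps.contains r
  · simp
  · have hr : r ∈ ps := by simpa using h
    simp [List.any_eq_true]
    exact ⟨r, hr, startswith_self r⟩

lemma find_map_pair (r c : String) (ps : List String) :
    ((ps.map (fun p => (p, c))).find? (fun pc => PySem.Str.startswith r pc.1)) =
      (ps.find? (fun p => PySem.Str.startswith r p)).map (fun p => (p, c)) := by
  induction ps with
  | nil => rfl
  | cons q qs ih =>
    rw [List.map_cons]
    cases h : PySem.Str.startswith r q with
    | true =>
      rw [List.find?_cons_of_pos (by exact h), List.find?_cons_of_pos (by exact h)]
      rfl
    | false =>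
      rw [List.find?_cons_of_neg (by simpa using h), List.find?_cons_of_neg (by simpa using h)]
      exact ih

-- A's first-matching-category scan is the first startswith match in the flattened table
lemma place_eq (r : String) :
    placeA r categoryMap =
      ((flatPats.find? (fun pc => PySem.Str.startswith r pc.1)).map (fun pc => pc.2)) := by
  show placeA r categoryMap =
    (((categoryMap.flatMap (fun cp => cp.2.map (fun p => (p, cp.1)))).find?
        (fun pc => PySem.Str.startswith r pc.1)).map (fun pc => pc.2))
  induction categoryMap with
  | nil => simp [placeA]
  | cons head rest ih =>
    obtain ⟨c, ps⟩ := head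
    rw [List.flatMap_cons, List.find?_append, find_map_pair, placeA, cond_eq]
    cases hf : ps.find? (fun p => PySem.Str.startswith r p) with
    | none =>
      have hany : ps.any (fun p => PySem.Str.startswith r p) = false := by
        rw [List.any_eq_false]
        intro p hp
        simpa using List.find?_eq_none.mp hf p hp
      rw [hany]
      simpa using ih
    | some p₀ =>
      have hany : ps.any (fun p => PySem.Str.startswith r p) = true := by
        rw [List.any_eq_true]
        exact ⟨p₀, List.mem_of_find?_eq_some hf, List.find?_some hf⟩
      rw [hany]
      simp

-- startswith as list prefix
lemma startswith_iff (r p : String) :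
    PySem.Str.startswith r p = true ↔ p.toList <+: r.toList := by
  rw [PySem.Str.startswith_eq, PySem.Chars.startswith_iff]

-- a successful dict probe yields an entry of the table
lemma get?_mem (s c : String) (h : patternCat.get? s = some c) : (s, c) ∈ flatPats := by
  have := PySem.Dict.mem_items_of_get?_eq_some patternCat h
  rwa [items_patternCat] at this

-- prefix-freeness: two table keys that are both prefixes of the same string are equal
lemma unique_key {p q r : String} {cp cq : String}
    (hp : (p, cp) ∈ flatPats) (hq : (q, cq) ∈ flatPats)
    (hpr : p.toList <+: r.toList) (hqr : q.toList <+: r.toList) : p = q := by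
  have hpf := pats_prefixfree
  rw [List.all_eq_true] at hpf
  have h1 := (List.all_eq_true.mp (hpf _ hp)) _ hq
  have h2 := (List.all_eq_true.mp (hpf _ hq)) _ hp
  simp only [Bool.or_eq_true, beq_iff_eq, Bool.not_eq_true'] at h1 h2
  rcases h1 with h1 | h1
  · exact h1
  rcases h2 with h2 | h2
  · exact h2.symm
  rcases List.prefix_or_prefix_of_prefix hpr hqr with hc | hc
  · exact absurd ((List.isPrefixOf_iff_prefix).mpr hc) (by simp [h1])
  · exact absurd ((List.isPrefixOf_iff_prefix).mpr hc) (by simp [h2])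

-- the probed string reason[:i]
lemma slice_toList (r : String) (i : Int) (h : 0 ≤ i) :
    (PySem.Str.slice r none (some i)).toList = r.toList.take i.toNat := by
  simp [PySem.List.slice_to _ h]

set_option maxRecDepth 100000 in
lemma classifyLoop_all_none (tbl : PySem.Dict String String) (r : String) (is : List Int)
    (h : ∀ i ∈ is, tbl.get? (PySem.Str.slice r none (some i)) = none) :
    classifyLoop tbl r is = "other" := by
  induction is with
  | nil => rfl
  | cons i rest ih =>
    rw [classifyLoop, h i (List.mem_cons_self ..)]
    exact ih (fun j hj => h j (List.mem_cons_of_mem _ hj))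

set_option maxRecDepth 100000 in
lemma classifyLoop_append (tbl : PySem.Dict String String) (r : String) (is₁ is₂ : List Int)
    (h : ∀ i ∈ is₁, tbl.get? (PySem.Str.slice r none (some i)) = none) :
    classifyLoop tbl r (is₁ ++ is₂) = classifyLoop tbl r is₂ := by
  induction is₁ with
  | nil => rfl
  | cons i rest ih =>
    rw [List.cons_append, classifyLoop, h i (List.mem_cons_self ..)]
    exact ih (fun j hj => h j (List.mem_cons_of_mem _ hj))

-- the classifier equivalence: B's prefix probing = A's first-match scan
set_option maxRecDepth 100000 in
lemma classify_eq (r : String) :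
    classifyB r = ((placeA r categoryMap).getD "other") := by
  rw [place_eq]
  unfold classifyB
  have hlen : PySem.Str.len r + 1 = (r.toList.length : Int) + 1 := by
    simp [PySem.Str.len]
  cases hf : flatPats.find? (fun pc => PySem.Str.startswith r pc.1) with
  | none =>
    have hnone : ∀ i ∈ PySem.List.pyRange 1 (PySem.Str.len r + 1) 1,
        patternCat.get? (PySem.Str.slice r none (some i)) = none := by
      intro i hi
      rw [hlen, PySem.List.mem_pyRange_one] at hi
      by_contra hsome
      obtain ⟨c, hc⟩ := Option.ne_none_iff_exists'.mp hsome
      have hmem := get?_mem _ _ hc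
      have hpref : (PySem.Str.slice r none (some i)).toList <+: r.toList := by
        rw [slice_toList _ _ (by omega)]
        exact List.take_prefix _ _
      have := List.find?_eq_none.mp hf _ hmem
      rw [startswith_iff] at this
      exact this hpref
    rw [classifyLoop_all_none patternCat r _ hnone]
    simp
  | some pc =>
    obtain ⟨p, c⟩ := pc
    have hmem : (p, c) ∈ flatPats := List.mem_of_find?_eq_some hf
    have hpref : p.toList <+: r.toList := by
      have h1 := List.find?_some hf
      rw [show ((p, c) : String × String).1 = p from rfl, startswith_iff] at h1
      exact h1
    have hLn : p.toList.length ≤ r.toList.length := hpref.length_le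
    have hL1 : 1 ≤ p.toList.length := by
      have hne := pats_nonempty
      rw [List.all_eq_true] at hne
      have hp0 := hne _ hmem
      simp only [Bool.not_eq_true', beq_eq_false_iff_ne, ne_eq] at hp0
      have hnil : p.toList ≠ [] := by
        intro h0
        exact hp0 (String.toList_inj.mp (by rw [h0]; rfl))
      exact List.length_pos_iff.mpr hnil
    -- split the probe range at L = |p|
    have hsplit : PySem.List.pyRange 1 (PySem.Str.len r + 1) 1 =
        PySem.List.pyRange 1 (p.toList.length : Int) 1 ++
          PySem.List.pyRange (p.toList.length : Int) (PySem.Str.len r + 1) 1 := by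
      rw [hlen]
      exact PySem.List.pyRange_one_append _ _ _ (by exact_mod_cast hL1) (by exact_mod_cast (by omega : (p.toList.length : Int) ≤ (r.toList.length : Int) + 1))
    rw [hsplit, classifyLoop_append]
    · -- the probe at i = |p| hits p
      have hcons : PySem.List.pyRange (p.toList.length : Int) (PySem.Str.len r + 1) 1 =
          (p.toList.length : Int) ::
            PySem.List.pyRange ((p.toList.length : Int) + 1) (PySem.Str.len r + 1) 1 := by
        rw [hlen]
        exact PySem.List.pyRange_one_cons (by exact_mod_cast (by omega : (p.toList.length : Int) < (r.toList.length : Int) + 1))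
      rw [hcons, classifyLoop]
      have hkey : PySem.Str.slice r none (some (p.toList.length : Int)) = p := by
        have h1 : (PySem.Str.slice r none (some (p.toList.length : Int))).toList = p.toList := by
          rw [slice_toList _ _ (by positivity)]
          simp only [Int.toNat_natCast]
          exact (List.prefix_iff_eq_take.mp hpref).symm
        exact String.toList_inj.mp h1
      rw [hkey]
      have hget : patternCat.get? p = some c :=
        PySem.Dict.get?_of_mem_items patternCat (by rw [items_patternCat]; exact hmem)
          keys_patternCat_nodup
      rw [hget]
      rfl
    · -- all probes with i < |p| miss
      intro i hi
      rw [PySem.List.mem_pyRange_one] at hi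
      by_contra hsome
      obtain ⟨c', hc'⟩ := Option.ne_none_iff_exists'.mp hsome
      have hmem' := get?_mem _ _ hc'
      have hpref' : (PySem.Str.slice r none (some i)).toList <+: r.toList := by
        rw [slice_toList _ _ (by omega)]
        exact List.take_prefix _ _
      have heq : PySem.Str.slice r none (some i) = p :=
        unique_key hmem' hmem hpref' hpref
      have hlen' : (PySem.Str.slice r none (some i)).toList.length = i.toNat := by
        rw [slice_toList _ _ (by omega), List.length_take]
        omega
      rw [heq] at hlen'
      omega

-- d.modify k dflt f is d.insert k (f (d.getD k dflt)) definitionally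
lemma modify_eq_insert (d : PySem.Dict String (PySem.Dict String Int)) (k : String)
    (f : PySem.Dict String Int → PySem.Dict String Int) :
    d.modify k PySem.Dict.empty f = d.insert k (f (d.getD k PySem.Dict.empty)) := rfl

-- the two loop bodies agree on every state and blocker entry
set_option maxRecDepth 100000 in
lemma step_eq (d : PySem.Dict String (PySem.Dict String Int)) (rc : String × Int) :
    (match placeA rc.1 categoryMap with
      | some cat => d.modify cat PySem.Dict.empty (fun inner => inner.insert rc.1 rc.2)
      | none => d.modify "other" PySem.Dict.empty (fun inner => inner.insert rc.1 rc.2)) =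
    d.insert (classifyB rc.1) ((d.getD (classifyB rc.1) PySem.Dict.empty).insert rc.1 rc.2) := by
  rw [classify_eq]
  cases placeA rc.1 categoryMap <;> simp [modify_eq_insert]

-- ===== VERDICT (by name: the statement is the Claim_ definition above) =====
set_option maxRecDepth 100000 in
theorem categorize_blockers_spec : Claim_equal_categorize_blockers := by
  intro blockers _
  unfold Spec_categorize_blockers categorize_blockers categorize_blockers_alt
  have hstep : (fun (d : PySem.Dict String (PySem.Dict String Int)) (rc : String × Int) =>
      match placeA rc.1 categoryMap with
      | some cat => d.modify cat PySem.Dict.empty (fun inner => inner.insert rc.1 rc.2)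
      | none => d.modify "other" PySem.Dict.empty (fun inner => inner.insert rc.1 rc.2)) =
      (fun d rc => d.insert (classifyB rc.1) ((d.getD (classifyB rc.1) PySem.Dict.empty).insert rc.1 rc.2)) := by
    funext d rc
    exact step_eq d rc
  rw [hstep]
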